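-- pv_equiv track=rewrite | github.com/guihcs/omatch | om/nlp.py | stokenize
-- ===== SOURCE A (Python) =====
-- def stokenize(w, rv):
--     if w in rv:
--         return [w]
--
--     li = 0
--     out = []
--
--     while li != len(w):
--
--         for i in range(len(w), li, -1):
--             p = '##' if li > 0 else ''
--             if p + w[li:i] in rv:
--                 out.append(p + w[li:i])
--                 li = i
--                 break
--         else:
--             out = ['[UNK]']
--             break
--
--     return out
-- ===== SOURCE B (Python) =====
-- def stokenize(w, rv):
--     vocab = set(rv)
--     if w in vocab:
--         return [w]
--
--     # index the vocabulary by its prefixes once, so the inner scan can stop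
--     # as soon as the current piece is no prefix of any vocabulary entry
--     prefixes = {t[:k] for t in vocab for k in range(1, len(t) + 1)}
--
--     n = len(w)
--     li = 0
--     out = []
--     while li < n:
--         p = '##' if li > 0 else ''
--         best = None
--         for i in range(li + 1, n + 1):
--             cur = p + w[li:i]
--             if cur not in prefixes:
--                 break
--             if cur in vocab:
--                 best = i
--         if best is None:
--             return ['[UNK]']
--         out.append(p + w[li:best])
--         li = best
--     return out
-- ===== Notes on version B (the rewrite author's own statement) =====
-- stated objective: faster
-- what changed: B builds a hash set of the vocabulary and of all its nonempty token prefixes once, then replaces A's longest-to-shortest inner substring scan (with a linear list membership test per candidate) by a left-to-right scan that keeps the deepest complete match and stops at the first piece that is no prefix of any vocabulary entry.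
import Mathlib
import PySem

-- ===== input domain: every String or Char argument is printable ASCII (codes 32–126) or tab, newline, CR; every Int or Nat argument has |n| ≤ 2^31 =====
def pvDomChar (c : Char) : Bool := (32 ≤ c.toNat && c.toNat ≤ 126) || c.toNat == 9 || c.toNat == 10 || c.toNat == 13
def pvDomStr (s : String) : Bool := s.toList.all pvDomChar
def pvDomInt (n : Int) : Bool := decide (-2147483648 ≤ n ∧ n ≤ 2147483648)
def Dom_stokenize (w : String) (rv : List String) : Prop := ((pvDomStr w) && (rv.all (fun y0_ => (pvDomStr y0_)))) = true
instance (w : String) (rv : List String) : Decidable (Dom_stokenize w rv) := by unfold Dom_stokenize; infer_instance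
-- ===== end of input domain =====

-- B indexes the vocabulary and all its nonempty prefixes in hash sets once, and replaces
-- A's longest-to-shortest inner substring scan by a left-to-right scan that keeps the
-- deepest complete match and stops at the first non-prefix piece (objective: faster,
-- measured).

-- ===== PORT A =====

-- the token p + w[li:i] (p = '##' iff li > 0); used verbatim by both Pythons
def pvTok (cs : List Char) (li i : Nat) : String :=
  String.ofList ((if 0 < li then ['#', '#'] else []) ++ PySem.List.slice cs (some (li : Int)) (some (i : Int)))

-- A's inner 'for i in range(len(w), li, -1): … break': first i from hi down to lo+1 with P i
def pvFindDown (P : Nat → Bool) (lo : Nat) : Nat → Option Nat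
  | i => if i ≤ lo then none else if P i then some i else pvFindDown P lo (i - 1)
termination_by i => i
decreasing_by
  rename_i h _
  exact Nat.sub_lt (Nat.lt_of_le_of_lt (Nat.zero_le lo) (Nat.lt_of_not_le h)) Nat.one_pos

lemma pvFindDown_bounds (P : Nat → Bool) (lo : Nat) :
    ∀ i j, pvFindDown P lo i = some j → lo < j ∧ j ≤ i := by
  intro i
  induction i using Nat.strong_induction_on with
  | _ i ih =>
    intro j h
    rw [pvFindDown] at h
    split at h
    · exact absurd h (by simp)
    · split at h
      · cases h; omega
      · rename_i h1 _
        have := ih (i - 1) (by omega) j h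
        omega

-- A's while-loop over (li, out)
def pvLoopA (cs : List Char) (rv : List String) (li : Nat) (out : List String) : List String :=
  if li = cs.length then out
  else
    match h : pvFindDown (fun i => decide (pvTok cs li i ∈ rv)) li cs.length with
    | some i => pvLoopA cs rv i (out ++ [pvTok cs li i])
    | none => ["[UNK]"]
termination_by cs.length - li
decreasing_by
  exact Nat.sub_lt_sub_left
    (Nat.lt_of_lt_of_le (pvFindDown_bounds _ li cs.length i h).1 (pvFindDown_bounds _ li cs.length i h).2)
    (pvFindDown_bounds _ li cs.length i h).1

def stokenize (w : String) (rv : List String) : List String :=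
  if w ∈ rv then [w] else pvLoopA w.toList rv 0 []

-- ===== PORT B =====

-- B's prefix index: { t[:k] | t in vocab, 1 ≤ k ≤ len(t) } as a Python set
def pvPrefixes (vocab : PySem.Set String) : PySem.Set String :=
  PySem.Set.ofList (vocab.flatMap (fun t =>
    (PySem.List.pyRange 1 (PySem.Str.len t + 1) 1).map (fun k => PySem.Str.slice t none (some k))))

-- B's inner 'for i in range(li+1, n+1): … break on not-a-prefix': last i up to n with P i,
-- stopping at the first i with ¬ Q i
def pvFindUpStop (P Q : Nat → Bool) (n : Nat) : Nat → Option Nat → Option Nat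
  | i, acc =>
    if n < i then acc
    else if ¬ Q i then acc
    else pvFindUpStop P Q n (i + 1) (if P i then some i else acc)
termination_by i _ => n + 1 - i
decreasing_by
  rename_i h _
  exact Nat.sub_succ_lt_self (n + 1) i (Nat.lt_succ_of_le (Nat.le_of_not_lt h))

lemma pvFindUpStop_some_aux (P Q : Nat → Bool) (n : Nat) :
    ∀ d i acc j, n + 1 - i ≤ d → pvFindUpStop P Q n i acc = some j →
      acc = some j ∨ (i ≤ j ∧ j ≤ n) := by
  intro d
  induction d with
  | zero =>
    intro i acc j hd h
    rw [pvFindUpStop] at h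
    rw [if_pos (by omega)] at h
    exact Or.inl h
  | succ d ih =>
    intro i acc j hd h
    rw [pvFindUpStop] at h
    by_cases hni : n < i
    · rw [if_pos hni] at h; exact Or.inl h
    · rw [if_neg hni] at h
      by_cases hq : Q i = true
      · rw [if_neg (by simp [hq])] at h
        rcases ih (i + 1) _ j (by omega) h with h1 | h1
        · by_cases hp : P i = true
          · rw [if_pos hp] at h1
            right; injection h1 with h1; omega
          · rw [if_neg hp] at h1; exact Or.inl h1
        · right; omega
      · rw [if_pos (by simp [hq])] at h; exact Or.inl h

lemma pvFindUpStop_some (P Q : Nat → Bool) (n : Nat) :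
    ∀ i acc j, pvFindUpStop P Q n i acc = some j → acc = some j ∨ (i ≤ j ∧ j ≤ n) :=
  fun i acc j h => pvFindUpStop_some_aux P Q n (n + 1 - i) i acc j le_rfl h

lemma pvLoopB_bound (n li i : Nat) {P Q : Nat → Bool}
    (h : pvFindUpStop P Q n (li + 1) none = some i) : li + 1 ≤ i ∧ i ≤ n := by
  rcases pvFindUpStop_some P Q n (li + 1) none i h with h1 | h1
  · exact absurd h1 (by simp)
  · exact h1

-- B's while-loop over (li, out); returns ['[UNK]'] from inside the loop
def pvLoopB (cs : List Char) (vocab prefixes : PySem.Set String) (li : Nat) (out : List String) : List String :=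
  if cs.length ≤ li then out
  else
    match h : pvFindUpStop (fun i => PySem.Set.contains vocab (pvTok cs li i))
        (fun i => PySem.Set.contains prefixes (pvTok cs li i)) cs.length (li + 1) none with
    | none => ["[UNK]"]
    | some i => pvLoopB cs vocab prefixes i (out ++ [pvTok cs li i])
termination_by cs.length - li
decreasing_by
  exact Nat.sub_lt_sub_left
    (Nat.lt_of_lt_of_le (Nat.lt_of_succ_le (pvLoopB_bound cs.length li i h).1)
      (pvLoopB_bound cs.length li i h).2)
    (Nat.lt_of_succ_le (pvLoopB_bound cs.length li i h).1)

def stokenize_alt (w : String) (rv : List String) : List String :=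
  let vocab := PySem.Set.ofList rv
  if PySem.Set.contains vocab w then [w]
  else pvLoopB w.toList vocab (pvPrefixes vocab) 0 []

-- ===== PRECONDITION & SPEC =====
def Spec_stokenize (w : String) (rv : List String) (out : List String) : Prop := out = stokenize_alt w rv
instance (w : String) (rv : List String) (out : List String) : Decidable (Spec_stokenize w rv out) := by unfold Spec_stokenize; infer_instance

-- ===== CLAIM (what is proved, stated in full; the proofs are below) =====
def Claim_equal_stokenize : Prop := ∀ (w : String) (rv : List String), Dom_stokenize w rv → Spec_stokenize w rv (stokenize w rv)

-- ===== LEMMAS AND PROOFS =====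

-- proof-only helper: B's scan without the early stop (last i in [i, n] with P i, else acc)
def pvFindUpLast (P : Nat → Bool) (n : Nat) : Nat → Option Nat → Option Nat
  | i, acc =>
    if n < i then acc
    else pvFindUpLast P n (i + 1) (if P i then some i else acc)
termination_by i _ => n + 1 - i
decreasing_by
  rename_i h
  exact Nat.sub_succ_lt_self (n + 1) i (Nat.lt_succ_of_le (Nat.le_of_not_lt h))

def pvOr (o a : Option Nat) : Option Nat := match o with | some j => some j | none => a

lemma pvFindDown_none (P : Nat → Bool) (lo m : Nat) (h : m ≤ lo) : pvFindDown P lo m = none := by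
  rw [pvFindDown, if_pos h]

lemma pvFindDown_split (P : Nat → Bool) (i : Nat) (h1 : 1 ≤ i) :
    ∀ m, i ≤ m → pvFindDown P (i - 1) m = pvOr (pvFindDown P i m) (if P i then some i else none) := by
  intro m hm
  induction m, hm using Nat.le_induction with
  | base =>
    rw [pvFindDown, if_neg (by omega)]
    rw [pvFindDown_none P i i le_rfl]
    by_cases hp : P i = true
    · rw [if_pos hp]; simp [pvOr, hp]
    · rw [if_neg hp]
      simp only [Bool.not_eq_true] at hp
      simp [pvOr, hp, pvFindDown_none P (i - 1) (i - 1) le_rfl]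
  | succ m hm ih =>
    rw [pvFindDown, if_neg (by omega)]
    conv_rhs => rw [pvFindDown, if_neg (by omega)]
    by_cases hp : P (m + 1) = true
    · simp [hp, pvOr]
    · simp only [Bool.not_eq_true] at hp
      simp only [hp]
      simp only [Bool.false_eq_true, if_false]
      simp only [Nat.add_sub_cancel] at ih ⊢
      exact ih

lemma pvUpLast_eq_down_aux (P : Nat → Bool) (n : Nat) :
    ∀ d i acc, n + 1 - i ≤ d → 1 ≤ i →
      pvFindUpLast P n i acc = pvOr (pvFindDown P (i - 1) n) acc := by
  intro d
  induction d with
  | zero =>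
    intro i acc hd h1
    rw [pvFindUpLast, if_pos (by omega), pvFindDown_none P (i - 1) n (by omega)]
    rfl
  | succ d ih =>
    intro i acc hd h1
    by_cases hni : n < i
    · rw [pvFindUpLast, if_pos hni, pvFindDown_none P (i - 1) n (by omega)]
      rfl
    · rw [pvFindUpLast, if_neg hni]
      rw [ih (i + 1) _ (by omega) (by omega)]
      rw [pvFindDown_split P i h1 n (by omega)]
      simp only [Nat.add_sub_cancel]
      cases hfd : pvFindDown P i n with
      | some j => simp [pvOr]
      | none =>
        by_cases hp : P i = true
        · simp [pvOr, hp]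
        · simp only [Bool.not_eq_true] at hp; simp [pvOr, hp]

lemma pvUpLast_eq_down (P : Nat → Bool) (n : Nat) :
    ∀ i acc, 1 ≤ i → pvFindUpLast P n i acc = pvOr (pvFindDown P (i - 1) n) acc :=
  fun i acc h1 => pvUpLast_eq_down_aux P n (n + 1 - i) i acc le_rfl h1

lemma pvUpLast_const_aux (P : Nat → Bool) (n : Nat) :
    ∀ d i acc, n + 1 - i ≤ d → (∀ k, i ≤ k → k ≤ n → P k = false) →
      pvFindUpLast P n i acc = acc := by
  intro d
  induction d with
  | zero =>
    intro i acc hd _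
    rw [pvFindUpLast, if_pos (by omega)]
  | succ d ih =>
    intro i acc hd hP
    by_cases hni : n < i
    · rw [pvFindUpLast, if_pos hni]
    · rw [pvFindUpLast, if_neg hni]
      rw [hP i le_rfl (by omega), if_neg (by simp)]
      exact ih (i + 1) acc (by omega) (fun k hk1 hk2 => hP k (by omega) hk2)

lemma pvUpLast_const (P : Nat → Bool) (n : Nat) :
    ∀ i acc, (∀ k, i ≤ k → k ≤ n → P k = false) → pvFindUpLast P n i acc = acc :=
  fun i acc h => pvUpLast_const_aux P n (n + 1 - i) i acc le_rfl h

lemma pvUpStop_eq_upLast_aux (P Q : Nat → Bool) (n : Nat) :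
    ∀ d i acc, n + 1 - i ≤ d → (∀ j k, i ≤ j → j ≤ k → k ≤ n → P k = true → Q j = true) →
      pvFindUpStop P Q n i acc = pvFindUpLast P n i acc := by
  intro d
  induction d with
  | zero =>
    intro i acc hd _
    rw [pvFindUpStop, pvFindUpLast, if_pos (by omega), if_pos (by omega)]
  | succ d ih =>
    intro i acc hd hPQ
    by_cases hni : n < i
    · rw [pvFindUpStop, pvFindUpLast, if_pos hni, if_pos hni]
    · rw [pvFindUpStop, pvFindUpLast, if_neg hni, if_neg hni]
      by_cases hq : Q i = true
      · rw [if_neg (by simp [hq])]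
        exact ih (i + 1) _ (by omega) (fun j k hj hk1 hk2 hp => hPQ j k (by omega) hk1 hk2 hp)
      · rw [if_pos (by simp [hq])]
        have hPfalse : ∀ k, i ≤ k → k ≤ n → P k = false := by
          intro k hk1 hk2
          by_contra hpk
          simp only [Bool.not_eq_false] at hpk
          exact hq (hPQ i k le_rfl hk1 hk2 hpk)
        rw [hPfalse i le_rfl (by omega), if_neg (by simp)]
        exact (pvUpLast_const P n (i + 1) acc (fun k hk1 hk2 => hPfalse k (by omega) hk2)).symm

lemma pvUpStop_eq_upLast (P Q : Nat → Bool) (n : Nat) (i : Nat) (acc : Option Nat)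
    (h : ∀ j k, i ≤ j → j ≤ k → k ≤ n → P k = true → Q j = true) :
    pvFindUpStop P Q n i acc = pvFindUpLast P n i acc :=
  pvUpStop_eq_upLast_aux P Q n (n + 1 - i) i acc le_rfl h

-- membership of a token prefix in B's prefix index
lemma pvTok_prefix_mem (cs : List Char) (rv : List String) (li j k : Nat)
    (hlj : li < j) (hjk : j ≤ k) (hk : k ≤ cs.length)
    (hmem : pvTok cs li k ∈ rv) :
    PySem.Set.contains (pvPrefixes (PySem.Set.ofList rv)) (pvTok cs li j) = true := by
  have hpl : ∀ m, li < m → m ≤ cs.length →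
      (pvTok cs li m).toList
        = (if 0 < li then ['#', '#'] else []) ++ (cs.drop li).take (m - li) := by
    intro m _ _
    simp [pvTok, PySem.List.slice_natCast]
  simp only [PySem.Set.contains, pvPrefixes, List.contains_iff_mem]
  rw [PySem.Set.mem_ofList]
  rw [List.mem_flatMap]
  refine ⟨pvTok cs li k, (PySem.Set.mem_ofList rv _).2 hmem, ?_⟩
  rw [List.mem_map]
  set pl : List Char := if 0 < li then ['#', '#'] else [] with hpl_def
  have hlen : (pvTok cs li k).toList.length = pl.length + (k - li) := by
    rw [hpl k (by omega) hk]
    simp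
    omega
  refine ⟨((pl.length + (j - li) : Nat) : Int), ?_, ?_⟩
  · rw [PySem.List.mem_pyRange_one]
    constructor
    · have : 1 ≤ pl.length + (j - li) := by omega
      exact_mod_cast this
    · simp only [PySem.Str.len_eq, hlen]
      push_cast
      omega
  · have htap : ∀ (l1 l2 : List Char) (n : Nat), (l1 ++ l2).take (l1.length + n) = l1 ++ l2.take n := by
      intro l1 l2 n; simp [List.take_append]
    have hsl : PySem.Str.slice (pvTok cs li k) none (some ((pl.length + (j - li) : Nat) : Int))
        = String.ofList ((pvTok cs li k).toList.take (pl.length + (j - li))) := by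
      simp only [PySem.Str.slice]
      have hcs : ∀ (l : List Char) (a b : Option Int), PySem.Chars.slice l a b = PySem.List.slice l a b :=
        fun _ _ _ => rfl
      rw [hcs, PySem.List.slice_to_natCast]
    rw [hsl, hpl k (by omega) hk]
    rw [htap, List.take_take, Nat.min_eq_left (by omega)]
    rw [pvTok, PySem.List.slice_natCast, ← hpl_def]

lemma pvLoop_eq (cs : List Char) (rv : List String) :
    ∀ li out, li ≤ cs.length →
      pvLoopA cs rv li out =
        pvLoopB cs (PySem.Set.ofList rv) (pvPrefixes (PySem.Set.ofList rv)) li out := by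
  suffices h : ∀ d li out, cs.length - li ≤ d → li ≤ cs.length →
      pvLoopA cs rv li out =
        pvLoopB cs (PySem.Set.ofList rv) (pvPrefixes (PySem.Set.ofList rv)) li out by
    exact fun li out hle => h (cs.length - li) li out le_rfl hle
  intro d
  induction d with
  | zero =>
    intro li out hd hle
    have hli : li = cs.length := by omega
    rw [pvLoopA, pvLoopB, if_pos hli, if_pos (by omega)]
  | succ d ih =>
    intro li out hd hle
    by_cases hli : li = cs.length
    · rw [pvLoopA, pvLoopB, if_pos hli, if_pos (by omega)]
    · rw [pvLoopA, pvLoopB, if_neg hli, if_neg (by omega)]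
      have hPeq : (fun i => PySem.Set.contains (PySem.Set.ofList rv) (pvTok cs li i))
          = (fun i => decide (pvTok cs li i ∈ rv)) := by
        funext i
        simp [PySem.Set.contains, PySem.Set.mem_ofList]
      have hfind : pvFindUpStop (fun i => PySem.Set.contains (PySem.Set.ofList rv) (pvTok cs li i))
          (fun i => PySem.Set.contains (pvPrefixes (PySem.Set.ofList rv)) (pvTok cs li i))
          cs.length (li + 1) none
          = pvFindDown (fun i => decide (pvTok cs li i ∈ rv)) li cs.length := by
        rw [hPeq]
        rw [pvUpStop_eq_upLast _ _ cs.length (li + 1) none ?_]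
        · rw [pvUpLast_eq_down _ cs.length (li + 1) none (by omega)]
          simp only [Nat.add_sub_cancel]
          cases pvFindDown (fun i => decide (pvTok cs li i ∈ rv)) li cs.length with
          | some j => rfl
          | none => rfl
        · intro j k hj hk1 hk2 hp
          exact pvTok_prefix_mem cs rv li j k (by omega) hk1 hk2 (by simpa using hp)
      rw [hfind]
      cases hfd : pvFindDown (fun i => decide (pvTok cs li i ∈ rv)) li cs.length with
      | none => rfl
      | some i =>
        have hb := pvFindDown_bounds _ li cs.length i hfd
        exact ih i (out ++ [pvTok cs li i]) (by omega) (by omega)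

-- ===== VERDICT (by name: the statement is the Claim_ definition above) =====
theorem stokenize_spec : Claim_equal_stokenize := by
  intro w rv _
  unfold Spec_stokenize stokenize stokenize_alt
  by_cases h : w ∈ rv
  · simp [h]
  · simp [h]
    exact pvLoop_eq w.toList rv 0 [] (by omega)
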